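-- pv_equiv track=rewrite | github.com/Fondamenti18/fondamenti-di-programmazione | students/1815142/homework03/program01.py | calcola_lato
-- ===== SOURCE A (Python) =====
-- def calcola_lato(img, x, y, c):
--     px=x
--     py=y
--     stato=True
--     lato=0
--     try:
--         while stato==True:
--             if check_square(img, px, py, lato, c)==True:
--                 lato+=1
--             else:
--                 stato=False
--     except IndexError:
--         None
--     return (lato-1)
--
-- def check_square(img, x, y, lato, colore):
--     for py in range(y, y+lato):
--         for px in range(x, x+lato):
--             if img[py][px]!=colore:
--                 return False
--     return True
-- ===== SOURCE B (Python) =====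
-- def calcola_lato(img, x, y, c):
--     # Incremental growth: for each candidate size lato+1 check only the NEW
--     # border (bottom row y+lato and right column x+lato) instead of
--     # re-scanning the whole square.
--     def ok(py, px):
--         try:
--             return img[py][px] == c
--         except IndexError:
--             return False
--     lato = 0
--     while all(ok(y + lato, px) for px in range(x, x + lato + 1)) and \
--           all(ok(py, x + lato) for py in range(y, y + lato)):
--         lato += 1
--     return lato
-- ===== Notes on version B (the rewrite author's own statement) =====
-- stated objective: alternative
-- what changed: Instead of re-scanning the entire lato x lato square at every growth step, B grows the square and checks only the newly added border row and column at each step (fewer pixel tests per step, though not measurably faster on the sampled inputs).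
import Mathlib
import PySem

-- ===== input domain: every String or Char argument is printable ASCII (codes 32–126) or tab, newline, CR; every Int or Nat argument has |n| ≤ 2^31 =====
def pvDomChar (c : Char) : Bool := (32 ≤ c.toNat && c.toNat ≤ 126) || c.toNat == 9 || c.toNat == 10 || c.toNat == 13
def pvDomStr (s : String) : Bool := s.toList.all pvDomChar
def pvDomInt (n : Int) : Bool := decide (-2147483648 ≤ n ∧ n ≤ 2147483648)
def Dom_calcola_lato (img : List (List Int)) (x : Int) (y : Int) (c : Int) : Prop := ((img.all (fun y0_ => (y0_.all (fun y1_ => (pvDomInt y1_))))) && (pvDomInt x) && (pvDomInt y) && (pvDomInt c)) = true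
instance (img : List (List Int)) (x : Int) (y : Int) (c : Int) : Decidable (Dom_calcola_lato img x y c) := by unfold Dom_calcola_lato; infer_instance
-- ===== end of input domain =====

-- B grows the square incrementally, checking only the new border row/column each step instead of re-scanning the whole square; equivalence proved on all inputs.


-- ===== PORT A =====
-- img[py][px] with Python semantics; none = IndexError (negative indices wrap)
def pvPix? (img : List (List Int)) (py px : Int) : Option Int :=
  match PySem.List.pyGet? img py with
  | none => none
  | some row => PySem.List.pyGet? row px

-- inner 'for px in range(x, x+lato)' of check_square; none = IndexError escaped
def pvInnerA (img : List (List Int)) (py : Int) (c : Int) : List Int → Option Bool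
  | [] => some true
  | px :: rest =>
    match pvPix? img py px with
    | none => none
    | some v => if v ≠ c then some false else pvInnerA img py c rest

-- outer 'for py in range(y, y+lato)' of check_square
def pvOuterA (img : List (List Int)) (x lato c : Int) : List Int → Option Bool
  | [] => some true
  | py :: rest =>
    match pvInnerA img py c (PySem.List.pyRange x (x + lato) 1) with
    | some true => pvOuterA img x lato c rest
    | r => r

def check_square (img : List (List Int)) (x y lato c : Int) : Option Bool :=
  pvOuterA img x lato c (PySem.List.pyRange y (y + lato) 1)

-- A's while loop; fuel only makes the recursion total (2*len(img)+3 always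
-- suffices: a successful check with lato ≥ 1 forces y+lato-1 < len(img) and
-- -len(img) ≤ y, hence lato ≤ 2*len(img)), the exhaustion branch is unreachable.
def pvLoopA (img : List (List Int)) (x y c : Int) : Nat → Int → Int
  | 0, lato => lato - 1
  | n + 1, lato =>
    match check_square img x y lato c with
    | some true => pvLoopA img x y c n (lato + 1)
    | _ => lato - 1

def calcola_lato (img : List (List Int)) (x : Int) (y : Int) (c : Int) : Int :=
  pvLoopA img x y c (2 * img.length + 3) 0

-- ===== PORT B =====
-- B's ok(py, px): pixel equals c, IndexError counts as failure
def pvOkB (img : List (List Int)) (c py px : Int) : Bool :=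
  match pvPix? img py px with
  | none => false
  | some v => v == c

-- the new border of the (lato+1)-sized square: bottom row and right column
def pvBorderB (img : List (List Int)) (x y lato c : Int) : Bool :=
  (PySem.List.pyRange x (x + lato + 1) 1).all (fun px => pvOkB img c (y + lato) px) &&
  (PySem.List.pyRange y (y + lato) 1).all (fun py => pvOkB img c py (x + lato))

-- B's while loop; same fuel remark as for A (2*len(img)+2 suffices)
def pvLoopB (img : List (List Int)) (x y c : Int) : Nat → Int → Int
  | 0, lato => lato
  | n + 1, lato =>
    if pvBorderB img x y lato c then pvLoopB img x y c n (lato + 1) else lato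

def calcola_lato_alt (img : List (List Int)) (x : Int) (y : Int) (c : Int) : Int :=
  pvLoopB img x y c (2 * img.length + 2) 0

-- ===== PRECONDITION & SPEC =====
def Spec_calcola_lato (img : List (List Int)) (x : Int) (y : Int) (c : Int) (out : Int) : Prop := out = calcola_lato_alt img x y c
instance (img : List (List Int)) (x : Int) (y : Int) (c : Int) (out : Int) : Decidable (Spec_calcola_lato img x y c out) := by unfold Spec_calcola_lato; infer_instance

-- ===== CLAIM (what is proved, stated in full; the proofs are below) =====
def Claim_equal_calcola_lato : Prop := ∀ (img : List (List Int)) (x : Int) (y : Int) (c : Int), Dom_calcola_lato img x y c → Spec_calcola_lato img x y c (calcola_lato img x y c)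

-- ===== LEMMAS AND PROOFS =====

-- "the lato × lato square at (x,y) is all ok" as a Bool predicate
def sqOk (img : List (List Int)) (x y c lato : Int) : Bool :=
  (PySem.List.pyRange y (y + lato) 1).all
    (fun py => (PySem.List.pyRange x (x + lato) 1).all (fun px => pvOkB img c py px))

theorem pvInnerA_eq_all (img : List (List Int)) (py c : Int) (pxs : List Int) :
    (pvInnerA img py c pxs = some true) ↔ (pxs.all (fun px => pvOkB img c py px) = true) := by
  induction pxs with
  | nil => simp [pvInnerA]
  | cons px rest ih =>
    simp only [pvInnerA, List.all_cons, Bool.and_eq_true, pvOkB]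
    cases h : pvPix? img py px with
    | none => simp
    | some v =>
      by_cases hv : v = c
      · simpa [hv] using ih
      · simp [hv]

theorem pvOuterA_eq_all (img : List (List Int)) (x lato c : Int) (pys : List Int) :
    (pvOuterA img x lato c pys = some true) ↔
      (pys.all (fun py => (PySem.List.pyRange x (x + lato) 1).all (fun px => pvOkB img c py px)) = true) := by
  induction pys with
  | nil => simp [pvOuterA]
  | cons py rest ih =>
    simp only [pvOuterA, List.all_cons, Bool.and_eq_true]
    cases h : pvInnerA img py c (PySem.List.pyRange x (x + lato) 1) with
    | none =>
      have : ¬ ((PySem.List.pyRange x (x + lato) 1).all (fun px => pvOkB img c py px) = true) := by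
        rw [← pvInnerA_eq_all]; simp [h]
      simp [this]
    | some b =>
      cases b with
      | true =>
        have hall : (PySem.List.pyRange x (x + lato) 1).all (fun px => pvOkB img c py px) = true := by
          rw [← pvInnerA_eq_all]; exact h
        simp [hall, ih]
      | false =>
        have : ¬ ((PySem.List.pyRange x (x + lato) 1).all (fun px => pvOkB img c py px) = true) := by
          rw [← pvInnerA_eq_all]; simp [h]
        simp [this]

theorem check_square_eq_sqOk (img : List (List Int)) (x y lato c : Int) :
    (check_square img x y lato c = some true) ↔ (sqOk img x y c lato = true) := by
  unfold check_square sqOk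
  exact pvOuterA_eq_all img x lato c _

-- growing the square by one = old square ∧ new border
theorem sqOk_succ (img : List (List Int)) (x y c lato : Int) (h : 0 ≤ lato) :
    (sqOk img x y c (lato + 1) = true) ↔
      (sqOk img x y c lato = true ∧ pvBorderB img x y lato c = true) := by
  unfold sqOk pvBorderB
  have hy : PySem.List.pyRange y (y + lato + 1) 1 = PySem.List.pyRange y (y + lato) 1 ++ [y + lato] := by
    have := PySem.List.pyRange_one_succ_right (a := y) (b := y + lato) (by omega)
    simpa using this
  have hx : PySem.List.pyRange x (x + lato + 1) 1 = PySem.List.pyRange x (x + lato) 1 ++ [x + lato] := by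
    have := PySem.List.pyRange_one_succ_right (a := x) (b := x + lato) (by omega)
    simpa using this
  have hy' : y + (lato + 1) = y + lato + 1 := by ring
  have hx' : x + (lato + 1) = x + lato + 1 := by ring
  rw [hy', hx', hy, hx]
  simp only [List.all_append, List.all_cons, List.all_nil, Bool.and_eq_true, Bool.and_true,
    List.all_eq_true]
  constructor
  · rintro ⟨h1, h2, h3⟩
    exact ⟨fun py hpy => (h1 py hpy).1, ⟨fun px hpx => h2 px hpx, h3⟩, fun py hpy => (h1 py hpy).2⟩
  · rintro ⟨h1, ⟨h2, h3⟩, h4⟩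
    exact ⟨fun py hpy => ⟨h1 py hpy, h4 py hpy⟩, fun px hpx => h2 px hpx, h3⟩

theorem loops_eq (img : List (List Int)) (x y c : Int) :
    ∀ (n : Nat) (lato : Int), 0 ≤ lato → sqOk img x y c lato = true →
      pvLoopA img x y c (n + 1) lato = pvLoopB img x y c n lato := by
  intro n
  induction n with
  | zero =>
    intro lato _ hsq
    have hc : check_square img x y lato c = some true := (check_square_eq_sqOk ..).mpr hsq
    simp [pvLoopA, pvLoopB, hc]
  | succ n ih =>
    intro lato hl hsq
    have hc : check_square img x y lato c = some true := (check_square_eq_sqOk ..).mpr hsq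
    show pvLoopA img x y c (n + 1 + 1) lato = pvLoopB img x y c (n + 1) lato
    rw [pvLoopA, hc]
    by_cases hb : pvBorderB img x y lato c = true
    · have hsq' : sqOk img x y c (lato + 1) = true := (sqOk_succ img x y c lato hl).mpr ⟨hsq, hb⟩
      rw [pvLoopB]
      simp only [hb, if_true]
      exact ih (lato + 1) (by omega) hsq'
    · have hsq' : ¬ (sqOk img x y c (lato + 1) = true) := by
        intro h; exact hb ((sqOk_succ img x y c lato hl).mp h).2
      have hc' : check_square img x y (lato + 1) c ≠ some true := by
        intro h; exact hsq' ((check_square_eq_sqOk ..).mp h)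
      rw [pvLoopA]
      rcases h2 : check_square img x y (lato + 1) c with _ | b
      · rw [pvLoopB]; simp [hb]
      · cases b
        · rw [pvLoopB]; simp [hb]
        · exact absurd h2 hc'

theorem sqOk_zero (img : List (List Int)) (x y c : Int) : sqOk img x y c 0 = true := by
  unfold sqOk
  rw [PySem.List.pyRange_one_eq_nil (by omega)]
  rfl

-- ===== VERDICT (by name: the statement is the Claim_ definition above) =====
theorem calcola_lato_spec : Claim_equal_calcola_lato := by
  intro img x y c _
  show calcola_lato img x y c = calcola_lato_alt img x y c
  unfold calcola_lato calcola_lato_alt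
  have : 2 * img.length + 3 = (2 * img.length + 2) + 1 := by omega
  rw [this]
  exact loops_eq img x y c (2 * img.length + 2) 0 le_rfl (sqOk_zero img x y c)
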